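-- pv_equiv track=rewrite | github.com/Sereni/synonyms | xml_parser.py | pretty_authors
-- ===== SOURCE A (Python) =====
-- def pretty_authors(s):
--     """
--     Replaces dictionary file names with authors' names
--     """
--     replacements = {
--             u'babenko.txt': u'Бабенко',
--             u'noss.txt': u'НОСС',
--             u'aleks.txt': u'Александрова',
--             u'abramov.txt': u'Абрамов',
--             u'evgen.txt': u'Евгеньева'
--         }
--     for key, value in replacements.items():
--             s = s.replace(key, value)
--     return s
-- ===== SOURCE B (Python) =====
-- def pretty_authors(s):
--     """
--     Replaces dictionary file names with authors' names
--     (single left-to-right scan instead of five sequential replace passes)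
--     """
--     out = []
--     i = 0
--     n = len(s)
--     while i < n:
--         if s.startswith(u'babenko.txt', i):
--             out.append(u'\u0411\u0430\u0431\u0435\u043d\u043a\u043e'); i += 11
--         elif s.startswith(u'noss.txt', i):
--             out.append(u'\u041d\u041e\u0421\u0421'); i += 8
--         elif s.startswith(u'aleks.txt', i):
--             out.append(u'\u0410\u043b\u0435\u043a\u0441\u0430\u043d\u0434\u0440\u043e\u0432\u0430'); i += 9
--         elif s.startswith(u'abramov.txt', i):
--             out.append(u'\u0410\u0431\u0440\u0430\u043c\u043e\u0432'); i += 11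
--         elif s.startswith(u'evgen.txt', i):
--             out.append(u'\u0415\u0432\u0433\u0435\u043d\u044c\u0435\u0432\u0430'); i += 9
--         else:
--             out.append(s[i]); i += 1
--     return ''.join(out)
-- ===== Notes on version B (the rewrite author's own statement) =====
-- stated objective: alternative
-- what changed: A runs five sequential full-string replace passes; B makes a single left-to-right scan with an if/elif chain that matches the five dictionary keys at the current position and copies a character otherwise (the keys provably never overlap, so one pass is exact).
import Mathlib
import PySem

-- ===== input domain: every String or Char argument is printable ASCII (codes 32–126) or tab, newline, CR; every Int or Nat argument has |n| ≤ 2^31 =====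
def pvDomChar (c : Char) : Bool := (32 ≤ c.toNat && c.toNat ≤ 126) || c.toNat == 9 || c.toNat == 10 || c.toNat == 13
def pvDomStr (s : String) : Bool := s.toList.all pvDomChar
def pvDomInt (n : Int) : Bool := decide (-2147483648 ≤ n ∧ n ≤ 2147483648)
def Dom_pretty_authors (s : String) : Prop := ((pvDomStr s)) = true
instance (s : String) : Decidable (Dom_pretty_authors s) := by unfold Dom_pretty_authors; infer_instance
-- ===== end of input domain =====

-- B replaces A's five sequential full-string replace passes by ONE left-to-right scan
-- (if/elif chain over the five keys at each position); same return value, alternative algorithm.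

-- ===== PORT A =====
def pretty_authors (s : String) : String :=
  let s1 := PySem.Str.replace s "babenko.txt" "Бабенко"
  let s2 := PySem.Str.replace s1 "noss.txt" "НОСС"
  let s3 := PySem.Str.replace s2 "aleks.txt" "Александрова"
  let s4 := PySem.Str.replace s3 "abramov.txt" "Абрамов"
  PySem.Str.replace s4 "evgen.txt" "Евгеньева"

-- ===== PORT B =====
def paK1 : List Char := "babenko.txt".toList
def paV1 : List Char := "Бабенко".toList
def paK2 : List Char := "noss.txt".toList
def paV2 : List Char := "НОСС".toList
def paK3 : List Char := "aleks.txt".toList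
def paV3 : List Char := "Александрова".toList
def paK4 : List Char := "abramov.txt".toList
def paV4 : List Char := "Абрамов".toList
def paK5 : List Char := "evgen.txt".toList
def paV5 : List Char := "Евгеньева".toList

-- single left-to-right scan: Source B's while/if-elif loop as structural recursion
def paScan : List Char → List Char
  | [] => []
  | c :: t =>
    if paK1.isPrefixOf (c :: t) then paV1 ++ paScan (t.drop 10)
    else if paK2.isPrefixOf (c :: t) then paV2 ++ paScan (t.drop 7)
    else if paK3.isPrefixOf (c :: t) then paV3 ++ paScan (t.drop 8)
    else if paK4.isPrefixOf (c :: t) then paV4 ++ paScan (t.drop 10)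
    else if paK5.isPrefixOf (c :: t) then paV5 ++ paScan (t.drop 8)
    else c :: paScan t
  termination_by l => l.length
  decreasing_by all_goals (simp [List.length_drop]; try omega)

def pretty_authors_alt (s : String) : String := String.ofList (paScan s.toList)

-- ===== PRECONDITION & SPEC =====
def Spec_pretty_authors (s : String) (out : String) : Prop := out = pretty_authors_alt s
instance (s : String) (out : String) : Decidable (Spec_pretty_authors s out) := by unfold Spec_pretty_authors; infer_instance

-- ===== CLAIM (what is proved, stated in full; the proofs are below) =====
def Claim_equal_pretty_authors : Prop := ∀ (s : String), Dom_pretty_authors s → Spec_pretty_authors s (pretty_authors s)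

-- ===== LEMMAS AND PROOFS =====

-- simple structural recursion computing Python's s.replace(k, v) for k ≠ []
def repC (k v : List Char) : List Char → List Char
  | [] => []
  | c :: t =>
    if k.isPrefixOf (c :: t) then v ++ repC k v (t.drop (k.length - 1)) else c :: repC k v t
  termination_by l => l.length
  decreasing_by all_goals (simp [List.length_drop]; try omega)

theorem repC_nil (k v : List Char) : repC k v [] = [] := by simp [repC]

theorem repC_cons (k v : List Char) (c : Char) (t : List Char) (h : ¬ k <+: (c :: t)) :
    repC k v (c :: t) = c :: repC k v t := by
  rw [repC, if_neg]
  exact fun hb => h (List.isPrefixOf_iff_prefix.mp hb)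

theorem repC_front (k v X : List Char) (hk : k ≠ []) :
    repC k v (k ++ X) = v ++ repC k v (X) := by
  obtain ⟨a, k', rfl⟩ := List.exists_cons_of_ne_nil hk
  rw [List.cons_append, repC, if_pos]
  · simp
  · exact List.isPrefixOf_iff_prefix.mpr (by rw [← List.cons_append]; exact List.prefix_append _ _)

theorem repC_append (k v : List Char) (u : List Char)
    (h : ∀ u₂ ∈ u.tails, u₂ ≠ [] → ¬ k <+: u₂ ∧ ¬ u₂ <+: k) :
    ∀ X, repC k v (u ++ X) = u ++ repC k v X := by
  induction u with
  | nil => intro X; simp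
  | cons c u' ih =>
    intro X
    have hcu := h (c :: u') ((List.mem_tails _ _).mpr (List.suffix_refl _)) (by simp)
    have hnp : ¬ k <+: ((c :: u') ++ X) := by
      intro hpre
      rcases Nat.lt_or_ge (c :: u').length k.length with hlt | hle
      · refine hcu.2 ?_
        obtain ⟨r, hr⟩ := hpre
        have h1 : ((c :: u') ++ X).take (c :: u').length = (k ++ r).take (c :: u').length := by
          rw [hr]
        rw [List.take_append_of_le_length (le_refl _),
            List.take_append_of_le_length (Nat.le_of_lt hlt), List.take_length] at h1
        exact h1 ▸ List.take_prefix _ _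
      · refine hcu.1 ?_
        have h1 : k = ((c :: u') ++ X).take k.length := List.prefix_iff_eq_take.mp hpre
        rw [List.take_append_of_le_length hle] at h1
        exact h1 ▸ List.take_prefix _ _
    rw [List.cons_append, repC_cons k v c (u' ++ X) (by rw [← List.cons_append]; exact hnp),
        ih (fun u₂ hu₂ => h u₂ ((List.mem_tails _ _).mpr (((List.mem_tails _ _).mp hu₂).trans (List.suffix_cons _ _))))]
    rfl

-- replacing by a value whose characters never occur in p cannot create a p-match at the front
theorem repC_not_prefix (k v : List Char) (hk : k ≠ []) (hv : v ≠ []) :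
    ∀ (n : Nat) (l p : List Char), l.length ≤ n → p.all (fun c => !(v.contains c)) = true →
      ¬ p <+: l → ¬ p <+: repC k v l := by
  intro n
  induction n with
  | zero =>
    intro l p hl _ hnp
    cases l with
    | nil => simpa [repC_nil] using hnp
    | cons c t => simp at hl
  | succ m ih =>
    intro l p hl hdisj hnp
    cases l with
    | nil => simpa [repC_nil] using hnp
    | cons c t =>
      by_cases hp : k <+: (c :: t)
      · obtain ⟨X, hX⟩ := hp
        rw [← hX, repC_front k v X hk]
        intro hpre
        cases p with
        | nil => exact hnp (List.nil_prefix)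
        | cons a p' =>
          obtain ⟨b, v', rfl⟩ := List.exists_cons_of_ne_nil hv
          rw [List.cons_append, List.cons_prefix_cons] at hpre
          have ha := List.all_eq_true.mp hdisj a List.mem_cons_self
          rw [hpre.1] at ha
          simp at ha
      · rw [repC_cons k v c t hp]
        intro hpre
        cases p with
        | nil => exact hnp (List.nil_prefix)
        | cons a p' =>
          rw [List.cons_prefix_cons] at hpre
          have hnp' : ¬ p' <+: t := by
            intro hp'
            exact hnp (List.cons_prefix_cons.mpr ⟨hpre.1, hp'⟩)
          have hdisj' : p'.all (fun c => !(v.contains c)) = true := by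
            rw [List.all_cons, Bool.and_eq_true] at hdisj
            exact hdisj.2
          exact ih t p' (by simpa using Nat.lt_succ_iff.mp (by simpa using hl))
            hdisj' hnp' hpre.2

-- the sequential composite of A's five replaces, on char lists
def paSeq (l : List Char) : List Char :=
  repC paK5 paV5 (repC paK4 paV4 (repC paK3 paV3 (repC paK2 paV2 (repC paK1 paV1 l))))

theorem paSeq_eq_paScan : ∀ (n : Nat) (l : List Char), l.length ≤ n → paSeq l = paScan l := by
  intro n
  induction n with
  | zero =>
    intro l hl
    have : l = [] := List.eq_nil_of_length_eq_zero (Nat.le_zero.mp hl)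
    subst this
    simp [paSeq, repC_nil, paScan]
  | succ m ih =>
    intro l hl
    cases l with
    | nil => simp [paSeq, repC_nil, paScan]
    | cons c t =>
      by_cases h1 : paK1 <+: (c :: t)
      · obtain ⟨X, hX⟩ := h1
        have hlen : X.length ≤ m := by
          have h' := congrArg List.length hX
          rw [List.length_append, show paK1.length = 11 from by decide, List.length_cons] at h'
          have hl' : t.length + 1 ≤ m + 1 := by simpa using hl
          omega
        rw [← hX]
        have step : paSeq (paK1 ++ X) = paV1 ++ paSeq X := by
          unfold paSeq
          rw [repC_front paK1 paV1 X (by decide),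
              repC_append paK2 paV2 paV1 (by decide),
              repC_append paK3 paV3 paV1 (by decide),
              repC_append paK4 paV4 paV1 (by decide),
              repC_append paK5 paV5 paV1 (by decide)]
        rw [step, ih X hlen]
        show _ = paScan (paK1 ++ X)
        rw [show paK1 ++ X = 'b' :: ("abenko.txt".toList ++ X) from rfl]
        rw [paScan]
        simp [paK1, List.isPrefixOf, List.drop]
      · by_cases h2 : paK2 <+: (c :: t)
        · obtain ⟨X, hX⟩ := h2
          have hlen : X.length ≤ m := by
            have h' := congrArg List.length hX
            rw [List.length_append, show paK2.length = 8 from by decide, List.length_cons] at h'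
            have hl' : t.length + 1 ≤ m + 1 := by simpa using hl
            omega
          rw [← hX]
          have step : paSeq (paK2 ++ X) = paV2 ++ paSeq X := by
            unfold paSeq
            rw [repC_append paK1 paV1 paK2 (by decide),
                repC_front paK2 paV2 _ (by decide),
                repC_append paK3 paV3 paV2 (by decide),
                repC_append paK4 paV4 paV2 (by decide),
                repC_append paK5 paV5 paV2 (by decide)]
          rw [step, ih X hlen]
          show _ = paScan (paK2 ++ X)
          rw [show paK2 ++ X = 'n' :: ("oss.txt".toList ++ X) from rfl]
          rw [paScan]
          simp [paK1, paK2, List.isPrefixOf, List.drop]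
        · by_cases h3 : paK3 <+: (c :: t)
          · obtain ⟨X, hX⟩ := h3
            have hlen : X.length ≤ m := by
              have h' := congrArg List.length hX
              rw [List.length_append, show paK3.length = 9 from by decide, List.length_cons] at h'
              have hl' : t.length + 1 ≤ m + 1 := by simpa using hl
              omega
            rw [← hX]
            have step : paSeq (paK3 ++ X) = paV3 ++ paSeq X := by
              unfold paSeq
              rw [repC_append paK1 paV1 paK3 (by decide),
                  repC_append paK2 paV2 paK3 (by decide),
                  repC_front paK3 paV3 _ (by decide),
                  repC_append paK4 paV4 paV3 (by decide),
                  repC_append paK5 paV5 paV3 (by decide)]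
            rw [step, ih X hlen]
            show _ = paScan (paK3 ++ X)
            rw [show paK3 ++ X = 'a' :: ("leks.txt".toList ++ X) from rfl]
            rw [paScan]
            simp [paK1, paK2, paK3, List.isPrefixOf, List.drop]
          · by_cases h4 : paK4 <+: (c :: t)
            · obtain ⟨X, hX⟩ := h4
              have hlen : X.length ≤ m := by
                have h' := congrArg List.length hX
                rw [List.length_append, show paK4.length = 11 from by decide, List.length_cons] at h'
                have hl' : t.length + 1 ≤ m + 1 := by simpa using hl
                omega
              rw [← hX]
              have step : paSeq (paK4 ++ X) = paV4 ++ paSeq X := by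
                unfold paSeq
                rw [repC_append paK1 paV1 paK4 (by decide),
                    repC_append paK2 paV2 paK4 (by decide),
                    repC_append paK3 paV3 paK4 (by decide),
                    repC_front paK4 paV4 _ (by decide),
                    repC_append paK5 paV5 paV4 (by decide)]
              rw [step, ih X hlen]
              show _ = paScan (paK4 ++ X)
              rw [show paK4 ++ X = 'a' :: ("bramov.txt".toList ++ X) from rfl]
              rw [paScan]
              simp [paK1, paK2, paK3, paK4, List.isPrefixOf]
            · by_cases h5 : paK5 <+: (c :: t)
              · obtain ⟨X, hX⟩ := h5
                have hlen : X.length ≤ m := by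
                  have h' := congrArg List.length hX
                  rw [List.length_append, show paK5.length = 9 from by decide, List.length_cons] at h'
                  have hl' : t.length + 1 ≤ m + 1 := by simpa using hl
                  omega
                rw [← hX]
                have step : paSeq (paK5 ++ X) = paV5 ++ paSeq X := by
                  unfold paSeq
                  rw [repC_append paK1 paV1 paK5 (by decide),
                      repC_append paK2 paV2 paK5 (by decide),
                      repC_append paK3 paV3 paK5 (by decide),
                      repC_append paK4 paV4 paK5 (by decide),
                      repC_front paK5 paV5 _ (by decide)]
                rw [step, ih X hlen]
                show _ = paScan (paK5 ++ X)
                rw [show paK5 ++ X = 'e' :: ("vgen.txt".toList ++ X) from rfl]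
                rw [paScan]
                simp [paK1, paK2, paK3, paK4, paK5, List.isPrefixOf]
              · -- no key matches at the front: both sides copy c
                have ht : t.length ≤ m := by simpa using Nat.lt_succ_iff.mp (by simpa using hl)
                have e1 : repC paK1 paV1 (c :: t) = c :: repC paK1 paV1 t :=
                  repC_cons _ _ _ _ h1
                have n2 : ¬ paK2 <+: repC paK1 paV1 (c :: t) :=
                  repC_not_prefix paK1 paV1 (by decide) (by decide) (c :: t).length _ _
                    (le_refl _) (by decide) h2
                have e2 : repC paK2 paV2 (repC paK1 paV1 (c :: t))
                    = c :: repC paK2 paV2 (repC paK1 paV1 t) := by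
                  rw [e1] at n2 ⊢
                  exact repC_cons _ _ _ _ n2
                have n3 : ¬ paK3 <+: repC paK2 paV2 (repC paK1 paV1 (c :: t)) := by
                  refine repC_not_prefix paK2 paV2 (by decide) (by decide)
                    (repC paK1 paV1 (c :: t)).length _ _ (le_refl _) (by decide) ?_
                  exact repC_not_prefix paK1 paV1 (by decide) (by decide) (c :: t).length _ _
                    (le_refl _) (by decide) h3
                have e3 : repC paK3 paV3 (repC paK2 paV2 (repC paK1 paV1 (c :: t)))
                    = c :: repC paK3 paV3 (repC paK2 paV2 (repC paK1 paV1 t)) := by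
                  rw [e2] at n3 ⊢
                  exact repC_cons _ _ _ _ n3
                have n4 : ¬ paK4 <+: repC paK3 paV3 (repC paK2 paV2 (repC paK1 paV1 (c :: t))) := by
                  refine repC_not_prefix paK3 paV3 (by decide) (by decide)
                    (repC paK2 paV2 (repC paK1 paV1 (c :: t))).length _ _ (le_refl _) (by decide) ?_
                  refine repC_not_prefix paK2 paV2 (by decide) (by decide)
                    (repC paK1 paV1 (c :: t)).length _ _ (le_refl _) (by decide) ?_
                  exact repC_not_prefix paK1 paV1 (by decide) (by decide) (c :: t).length _ _
                    (le_refl _) (by decide) h4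
                have e4 : repC paK4 paV4 (repC paK3 paV3 (repC paK2 paV2 (repC paK1 paV1 (c :: t))))
                    = c :: repC paK4 paV4 (repC paK3 paV3 (repC paK2 paV2 (repC paK1 paV1 t))) := by
                  rw [e3] at n4 ⊢
                  exact repC_cons _ _ _ _ n4
                have n5 : ¬ paK5 <+: repC paK4 paV4 (repC paK3 paV3 (repC paK2 paV2 (repC paK1 paV1 (c :: t)))) := by
                  refine repC_not_prefix paK4 paV4 (by decide) (by decide)
                    (repC paK3 paV3 (repC paK2 paV2 (repC paK1 paV1 (c :: t)))).length _ _
                    (le_refl _) (by decide) ?_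
                  refine repC_not_prefix paK3 paV3 (by decide) (by decide)
                    (repC paK2 paV2 (repC paK1 paV1 (c :: t))).length _ _ (le_refl _) (by decide) ?_
                  refine repC_not_prefix paK2 paV2 (by decide) (by decide)
                    (repC paK1 paV1 (c :: t)).length _ _ (le_refl _) (by decide) ?_
                  exact repC_not_prefix paK1 paV1 (by decide) (by decide) (c :: t).length _ _
                    (le_refl _) (by decide) h5
                have e5 : paSeq (c :: t) = c :: paSeq t := by
                  unfold paSeq
                  rw [e4] at n5 ⊢
                  exact repC_cons _ _ _ _ n5
                rw [e5, ih t ht, paScan]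
                rw [if_neg (fun hb => h1 (List.isPrefixOf_iff_prefix.mp hb)),
                    if_neg (fun hb => h2 (List.isPrefixOf_iff_prefix.mp hb)),
                    if_neg (fun hb => h3 (List.isPrefixOf_iff_prefix.mp hb)),
                    if_neg (fun hb => h4 (List.isPrefixOf_iff_prefix.mp hb)),
                    if_neg (fun hb => h5 (List.isPrefixOf_iff_prefix.mp hb))]

theorem go_eq (k v : List Char) (hk : k ≠ []) :
    ∀ (fuel : Nat) (l acc : List Char), l.length ≤ fuel →
      PySem.Chars.replace.go k v fuel l acc = acc.reverse ++ repC k v l := by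
  intro fuel
  induction fuel with
  | zero =>
    intro l acc hl
    have : l = [] := List.eq_nil_of_length_eq_zero (Nat.le_zero.mp hl)
    subst this
    simp [PySem.Chars.replace.go, repC_nil]
  | succ m ih =>
    intro l acc hl
    cases l with
    | nil => simp [PySem.Chars.replace.go, repC_nil]
    | cons c t =>
      rw [PySem.Chars.replace.go]
      by_cases hp : k.isPrefixOf (c :: t)
      · obtain ⟨a, k', rfl⟩ := List.exists_cons_of_ne_nil hk
        rw [if_pos hp]
        have hdl : List.drop (a :: k').length (c :: t) = t.drop ((a :: k').length - 1) := by
          simp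
        rw [hdl, ih _ _ (by simp at hl ⊢; omega), repC, if_pos hp]
        simp
      · rw [if_neg hp, ih t (c :: acc) (by simpa using Nat.lt_succ_iff.mp (by simpa using hl)),
            repC_cons _ _ _ _ (fun h => hp (List.isPrefixOf_iff_prefix.mpr h))]
        simp

theorem replace_eq (l k v : List Char) (hk : k ≠ []) :
    PySem.Chars.replace l k v = repC k v l := by
  rw [PySem.Chars.replace, if_neg (by simpa [List.isEmpty_iff] using hk),
      go_eq k v hk l.length l [] (le_refl _)]
  simp

-- ===== VERDICT (by name: the statement is the Claim_ definition above) =====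
theorem pretty_authors_spec : Claim_equal_pretty_authors := by
  intro s _
  show pretty_authors s = pretty_authors_alt s
  simp only [pretty_authors, pretty_authors_alt, PySem.Str.replace, String.toList_ofList]
  congr 1
  rw [replace_eq, replace_eq, replace_eq, replace_eq, replace_eq]
  · exact paSeq_eq_paScan s.toList.length s.toList (le_refl _)
  · decide
  · decide
  · decide
  · decide
  · decide
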